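-- pv_equiv track=rewrite | github.com/thanhlongqax/HCSDL | Bai1.py | get_entity_attributes
-- ===== SOURCE A (Python) =====
-- def get_entity_attributes(data):
--     entity_attributes = {}
--
--     capturing = False
--     current_entity = None
--
--     for line in data:
--         line = line.strip()
--
--         if line == "@":
--             capturing = not capturing
--         elif capturing is False:
--             entity_info = line.split(':')
--             current_entity = entity_info[0].strip()
--             attributes = [attr.strip() for attr in entity_info[1].split(',')]
--             entity_attributes[current_entity] = attributes
--
--     return entity_attributes
-- ===== SOURCE B (Python) =====
-- def get_entity_attributes(data):
--     # Phase 1: strip all lines and partition them into segments separated by "@" markers.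
--     stripped = [line.strip() for line in data]
--     segments = []
--     cur = []
--     for line in stripped:
--         if line == "@":
--             segments.append(cur)
--             cur = []
--         else:
--             cur.append(line)
--     segments.append(cur)
--     # Phase 2: parse only the even-indexed segments (the regions outside '@'-delimited blocks).
--     entity_attributes = {}
--     for idx, seg in enumerate(segments):
--         if idx % 2 == 0:
--             for line in seg:
--                 parts = line.split(':')
--                 entity_attributes[parts[0].strip()] = [a.strip() for a in parts[1].split(',')]
--     return entity_attributes
-- ===== Notes on version B (the rewrite author's own statement) =====
-- stated objective: alternative
-- what changed: Replaced A's single-pass toggle ('capturing') state machine by a two-phase computation: first partition the stripped lines into segments separated by '@' markers, then parse only the even-indexed segments into the dict.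
import Mathlib
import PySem

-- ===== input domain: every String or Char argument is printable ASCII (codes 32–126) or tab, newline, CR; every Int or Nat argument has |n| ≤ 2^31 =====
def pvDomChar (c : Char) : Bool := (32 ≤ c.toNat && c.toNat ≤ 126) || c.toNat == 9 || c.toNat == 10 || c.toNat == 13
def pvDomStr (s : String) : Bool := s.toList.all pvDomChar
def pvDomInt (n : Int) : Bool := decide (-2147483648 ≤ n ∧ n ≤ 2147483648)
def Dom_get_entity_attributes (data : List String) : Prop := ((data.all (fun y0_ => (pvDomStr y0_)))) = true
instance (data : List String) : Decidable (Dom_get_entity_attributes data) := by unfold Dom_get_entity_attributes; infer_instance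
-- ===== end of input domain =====

-- B replaces A's one-pass toggle state machine by a two-phase computation (partition the stripped
-- lines into '@'-separated segments, then parse only the even-indexed segments); objective: alternative.

-- ===== PORT A =====
-- one loop step of A: state = (dict, capturing, current_entity)
def pvStepA (st : PySem.Dict String (List String) × Bool × Option String) (line : String)
    : PySem.Dict String (List String) × Bool × Option String :=
  let line := PySem.Str.strip line
  if line == "@" then (st.1, !st.2.1, st.2.2)
  else if st.2.1 == false then
    let entity_info := (PySem.Str.split? line ":").getD []   -- sep ":" is nonempty: split? is always some
    let current_entity := PySem.Str.strip (PySem.List.pyGetD entity_info 0 "")  -- entity_info[0] always exists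
    match PySem.List.pyGet? entity_info 1 with   -- none = Python's IndexError; excluded by Pre_
    | some a1 =>
        let attributes := ((PySem.Str.split? a1 ",").getD []).map PySem.Str.strip
        (st.1.insert current_entity attributes, st.2.1, some current_entity)
    | none => st
  else st

def get_entity_attributes (data : List String) : List (String × List String) :=
  (data.foldl pvStepA (PySem.Dict.empty, false, none)).1.items

-- ===== PORT B =====
-- phase 1 step: partition the stripped lines into segments separated by "@" markers
def pvSegStep (acc : List (List String) × List String) (line : String) : List (List String) × List String :=
  if line == "@" then (acc.1 ++ [acc.2], []) else (acc.1, acc.2 ++ [line])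

-- phase 2: parse one line of an even-indexed segment into the dict
def pvParseB (d : PySem.Dict String (List String)) (line : String) : PySem.Dict String (List String) :=
  let parts := (PySem.Str.split? line ":").getD []   -- sep ":" is nonempty: split? is always some
  match PySem.List.pyGet? parts 1 with   -- none = Python's IndexError; excluded by Pre_
  | some a1 =>
      d.insert (PySem.Str.strip (PySem.List.pyGetD parts 0 ""))  -- parts[0] always exists
        (((PySem.Str.split? a1 ",").getD []).map PySem.Str.strip)
  | none => d

def get_entity_attributes_alt (data : List String) : List (String × List String) :=
  let stripped := data.map PySem.Str.strip
  let p := stripped.foldl pvSegStep ([], [])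
  let segments := p.1 ++ [p.2]
  ((PySem.List.enumerate segments).foldl
    (fun d iseg => if PySem.Int.mod iseg.1 2 == 0 then iseg.2.foldl pvParseB d else d)
    PySem.Dict.empty).items

-- ===== PRECONDITION & SPEC =====
-- Pre_ excludes exactly the inputs on which the Python A raises IndexError: a line whose stripped
-- form is not "@", is preceded by an even number of "@"-marker lines (so it gets parsed), and
-- contains no ':'.
def Pre_get_entity_attributes (data : List String) : Prop :=
  ∀ i < data.length,
    (PySem.Str.strip (data.getD i "")) ≠ "@" →
    ((data.map PySem.Str.strip).take i).count "@" % 2 = 0 →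
    ':' ∈ (PySem.Str.strip (data.getD i "")).toList

instance (data : List String) : Decidable (Pre_get_entity_attributes data) := by
  unfold Pre_get_entity_attributes; infer_instance

def pvWitness_get_entity_attributes : List String :=
  ["Person: name , age", "@", "ignored comment", "@", " Car :wheels"]

def Spec_get_entity_attributes (data : List String) (out : List (String × List String)) : Prop := out = get_entity_attributes_alt data
instance (data : List String) (out : List (String × List String)) : Decidable (Spec_get_entity_attributes data out) := by unfold Spec_get_entity_attributes; infer_instance

-- ===== CLAIM (what is proved, stated in full; the proofs are below) =====
def Claim_equal_get_entity_attributes : Prop := ∀ (data : List String), Dom_get_entity_attributes data → Pre_get_entity_attributes data → Spec_get_entity_attributes data (get_entity_attributes data)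

-- ===== LEMMAS AND PROOFS =====

-- bridge recursion: the segment decomposition of a (stripped) line list
def pvSegsOf : List String → List (List String)
  | [] => [[]]
  | l :: ls =>
      if l == "@" then [] :: pvSegsOf ls
      else match pvSegsOf ls with
           | [] => [[l]]           -- unreachable: pvSegsOf is never []
           | s :: rest => (l :: s) :: rest

-- abstract alternating processor over segments (c = capturing: skip when true)
def pvProc (d : PySem.Dict String (List String)) (c : Bool) : List (List String) → PySem.Dict String (List String)
  | [] => d
  | seg :: rest => pvProc (if c == false then seg.foldl pvParseB d else d) (!c) rest

lemma pvSegsOf_ne_nil (ls : List String) : pvSegsOf ls ≠ [] := by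
  cases ls with
  | nil => simp [pvSegsOf]
  | cons l ls =>
      simp only [pvSegsOf]
      split
      · simp
      · cases h : pvSegsOf ls <;> simp

-- A's fold equals the alternating processor over the segment decomposition of the stripped lines
lemma pvFoldA_eq_proc (ls : List String) (d : PySem.Dict String (List String)) (c : Bool) (e : Option String) :
    (ls.foldl pvStepA (d, c, e)).1 = pvProc d c (pvSegsOf (ls.map PySem.Str.strip)) := by
  induction ls generalizing d c e with
  | nil => simp [pvProc, pvSegsOf]
  | cons l ls ih =>
      simp only [List.foldl_cons, List.map_cons, pvSegsOf]
      by_cases hm : PySem.Str.strip l == "@"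
      · have hstep : pvStepA (d, c, e) l = (d, !c, e) := by
          unfold pvStepA
          rw [if_pos hm]
        rw [hstep, if_pos hm, ih]
        cases c <;> simp [pvProc]
      · rw [if_neg hm]
        cases c with
        | false =>
            have hne := pvSegsOf_ne_nil (ls.map PySem.Str.strip)
            cases hseg : pvSegsOf (ls.map PySem.Str.strip) with
            | nil => exact absurd hseg hne
            | cons s rest =>
                simp only [pvProc, Bool.not_false]
                have hstep : pvStepA (d, false, e) l =
                    (pvParseB d (PySem.Str.strip l), false,
                      match PySem.List.pyGet? ((PySem.Str.split? (PySem.Str.strip l) ":").getD []) 1 with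
                      | some _ => some (PySem.Str.strip (PySem.List.pyGetD ((PySem.Str.split? (PySem.Str.strip l) ":").getD []) 0 ""))
                      | none => e) := by
                  unfold pvStepA pvParseB
                  rw [if_neg hm]
                  dsimp only
                  cases PySem.List.pyGet? ((PySem.Str.split? (PySem.Str.strip l) ":").getD []) 1 <;> rfl
                rw [hstep, ih, hseg]
                simp [pvProc]
        | true =>
            have hstep : pvStepA (d, true, e) l = (d, true, e) := by
              unfold pvStepA
              rw [if_neg hm]
              rfl
            rw [hstep, ih]
            have hne := pvSegsOf_ne_nil (ls.map PySem.Str.strip)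
            cases hseg : pvSegsOf (ls.map PySem.Str.strip) with
            | nil => exact absurd hseg hne
            | cons s rest => simp [pvProc]

-- helper for the B side: prepend lines to the first segment
def pvMapHead (cur : List String) : List (List String) → List (List String)
  | [] => []
  | s :: rest => (cur ++ s) :: rest

-- B's phase-1 fold produces exactly the segment decomposition
lemma pvFoldSeg_eq_segsOf (ls : List String) (segs : List (List String)) (cur : List String) :
    (ls.foldl pvSegStep (segs, cur)).1 ++ [(ls.foldl pvSegStep (segs, cur)).2] =
      segs ++ pvMapHead cur (pvSegsOf ls) := by
  induction ls generalizing segs cur with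
  | nil => simp [pvSegsOf, pvMapHead]
  | cons l ls ih =>
      simp only [List.foldl_cons, pvSegsOf]
      by_cases hm : l == "@"
      · simp only [hm, if_pos, pvSegStep]
        rw [ih]
        have hne := pvSegsOf_ne_nil ls
        cases hseg : pvSegsOf ls with
        | nil => exact absurd hseg hne
        | cons s rest => simp [pvMapHead]
      · rw [if_neg (by simpa using hm)]
        have : pvSegStep (segs, cur) l = (segs, cur ++ [l]) := by
          simp [pvSegStep, hm]
        rw [this, ih]
        have hne := pvSegsOf_ne_nil ls
        cases hseg : pvSegsOf ls with
        | nil => exact absurd hseg hne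
        | cons s rest => simp [pvMapHead]

-- B's phase-2 fold over enumerated segments equals the alternating processor
lemma pvFoldEnum_eq_proc (segs : List (List String)) (d : PySem.Dict String (List String)) (n : Nat) :
    ((PySem.List.enumerate segs (n : Int)).foldl
      (fun d iseg => if PySem.Int.mod iseg.1 2 == 0 then iseg.2.foldl pvParseB d else d) d) =
    pvProc d (decide (n % 2 = 1)) segs := by
  induction segs generalizing d n with
  | nil => simp [PySem.List.enumerate_nil, pvProc]
  | cons s rest ih =>
      rw [PySem.List.enumerate_cons]
      simp only [List.foldl_cons]
      have h1 : ((n : Int) + 1) = ((n + 1 : Nat) : Int) := by push_cast; ring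
      rw [h1, ih]
      by_cases h : n % 2 = 0
      · have hd : (2 : Int) ∣ (n : Int) := by omega
        have hn1 : (n + 1) % 2 = 1 := by omega
        simp [pvProc, h, hn1, hd]
      · have hd : ¬ (2 : Int) ∣ (n : Int) := by omega
        have h1' : n % 2 = 1 := by omega
        have hn1 : (n + 1) % 2 = 0 := by omega
        simp [pvProc, h1', hn1, hd]

-- ===== VERDICT (by name: the statement is the Claim_ definition above) =====
theorem get_entity_attributes_spec : Claim_equal_get_entity_attributes := by
  intro data _ _
  unfold Spec_get_entity_attributes get_entity_attributes get_entity_attributes_alt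
  rw [pvFoldA_eq_proc]
  have hseg : ((data.map PySem.Str.strip).foldl pvSegStep ([], [])).1 ++
      [((data.map PySem.Str.strip).foldl pvSegStep ([], [])).2] =
      pvSegsOf (data.map PySem.Str.strip) := by
    rw [pvFoldSeg_eq_segsOf]
    have hne := pvSegsOf_ne_nil (data.map PySem.Str.strip)
    cases hs : pvSegsOf (data.map PySem.Str.strip) with
    | nil => exact absurd hs hne
    | cons a b => simp [pvMapHead]
  simp only [hseg]
  have hE := pvFoldEnum_eq_proc (pvSegsOf (data.map PySem.Str.strip)) PySem.Dict.empty 0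
  simp only [Nat.cast_zero] at hE
  rw [hE]
  norm_num
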